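-- pv_equiv track=rewrite | github.com/PLSE-Lab/Python-MLAPI-expl | python_sources/cuisine-analysis.py | tokenizer_all
-- ===== SOURCE A (Python) =====
-- space_join = " ".join
--
-- def tokenizer_all(doc):
--     tokens = list(ingredient.strip() for ingredient in doc.split(","))
--     unigrams = []
--     for word in tokens:
--         if len(word.split()) >= 1:
--             unigrams.append(word.split()[-1])
--         else:
--             unigrams.append(word)
--
--     results = []
--     results_extend = results.extend
--     for i, item in enumerate(unigrams):
--         if i == len(unigrams) - 1:
--             continue
--         results_extend([space_join([unigrams[i], unigrams[i + 1]])])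
--     return results
-- ===== SOURCE B (Python) =====
-- def tokenizer_all(doc):
--     # single character-level scan: no split()/strip(), no intermediate lists
--     WS = " \t\n\r\v\f"
--     results = []
--     prev = None
--     last = ""   # last completed non-whitespace run in the current segment
--     cur = ""    # non-whitespace run currently being read
--     for ch in doc + ",":
--         if ch == ",":
--             uni = cur if cur else last
--             if prev is not None:
--                 results.append(prev + " " + uni)
--             prev = uni
--             last = ""
--             cur = ""
--         elif ch in WS:
--             if cur:
--                 last = cur
--             cur = ""
--         else:
--             cur += ch
--     return results
-- ===== Notes on version B (the rewrite author's own statement) =====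
-- stated objective: alternative
-- what changed: Replaced A's split/strip/split pipeline (comma-split, per-token strip, whitespace-split list, then an index-based pairing loop over a unigrams list) with a single character-level scan: a small state machine over the document with a trailing comma sentinel that tracks the current and last non-whitespace run of the current segment and emits each bigram at a segment boundary, never calling split or strip and never materialising token or unigram lists.
import Mathlib
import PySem

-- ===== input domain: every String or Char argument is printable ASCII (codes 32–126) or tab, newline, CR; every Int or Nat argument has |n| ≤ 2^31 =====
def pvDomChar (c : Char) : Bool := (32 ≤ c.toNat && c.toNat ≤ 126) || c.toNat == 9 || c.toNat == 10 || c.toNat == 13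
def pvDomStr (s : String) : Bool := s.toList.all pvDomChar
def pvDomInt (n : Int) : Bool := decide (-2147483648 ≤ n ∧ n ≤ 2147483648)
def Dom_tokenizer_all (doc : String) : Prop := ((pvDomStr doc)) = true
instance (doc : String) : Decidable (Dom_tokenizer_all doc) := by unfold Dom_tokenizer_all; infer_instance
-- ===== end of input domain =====

-- B replaces A's split/strip/split pipeline and index-pairing loop by a single character-level
-- state machine over doc + "," (objective: alternative; same return value).

-- ===== PORT A =====
def tokenizer_all (doc : String) : List String :=
  let tokens := ((PySem.Str.split? doc ",").getD []).map PySem.Str.strip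
  let unigrams := tokens.foldl (fun acc word =>
    if (PySem.Str.split₀ word).length ≥ 1 then
      acc ++ [PySem.List.pyGetD (PySem.Str.split₀ word) (-1) ""]
    else acc ++ [word]) []
  (PySem.List.enumerate unigrams 0).foldl (fun res p =>
    if p.1 = (unigrams.length : Int) - 1 then res
    else res ++ [PySem.Str.join " " [PySem.List.pyGetD unigrams p.1 "",
                                     PySem.List.pyGetD unigrams (p.1 + 1) ""]]) []

-- ===== PORT B =====
-- the whitespace characters Source B's WS string holds
def pvWS : List Char := [' ', '\t', '\n', '\r', '\x0b', '\x0c']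

-- state: (results, prev, last, cur); strings kept as List Char, built exactly as Source B builds them
def tokenizer_all_alt (doc : String) : List String :=
  (((doc.toList ++ [',']).foldl
    (fun (st : List (List Char) × Option (List Char) × List Char × List Char) ch =>
      let res := st.1; let prev := st.2.1; let last := st.2.2.1; let cur := st.2.2.2
      if ch = ',' then
        let uni := if cur ≠ [] then cur else last
        (match prev with
         | some p => res ++ [p ++ [' '] ++ uni]
         | none => res, some uni, ([] : List Char), ([] : List Char))
      else if pvWS.contains ch then
        (res, prev, (if cur ≠ [] then cur else last), ([] : List Char))
      else
        (res, prev, last, cur ++ [ch]))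
    ([], none, [], [])).1).map String.ofList

-- ===== PRECONDITION & SPEC =====
def Spec_tokenizer_all (doc : String) (out : List String) : Prop := out = tokenizer_all_alt doc
instance (doc : String) (out : List String) : Decidable (Spec_tokenizer_all doc out) := by unfold Spec_tokenizer_all; infer_instance

-- ===== CLAIM (what is proved, stated in full; the proofs are below) =====
def Claim_equal_tokenizer_all : Prop := ∀ (doc : String), Dom_tokenizer_all doc → Spec_tokenizer_all doc (tokenizer_all doc)

-- ===== LEMMAS AND PROOFS =====

-- ---------- A-side: reduce port A to pairs of per-token unigrams (String level) ----------

def pvPairs : List String → List String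
  | a :: b :: rest => (a ++ " " ++ b) :: pvPairs (b :: rest)
  | _ => []

def pvUni (word : String) : String :=
  if (PySem.Str.split₀ word).length ≥ 1 then PySem.List.pyGetD (PySem.Str.split₀ word) (-1) ""
  else word

lemma pvJoin_pair (a b : String) : PySem.Str.join " " [a, b] = a ++ " " ++ b := by
  apply String.ext
  rw [PySem.Str.toList_join]
  simp [PySem.Chars.join, List.intercalate]

lemma pvA_unigrams (tokens : List String) :
    tokens.foldl (fun acc word =>
      if (PySem.Str.split₀ word).length ≥ 1 then
        acc ++ [PySem.List.pyGetD (PySem.Str.split₀ word) (-1) ""]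
      else acc ++ [word]) [] = tokens.map pvUni := by
  have h : (fun (acc : List String) word =>
      if (PySem.Str.split₀ word).length ≥ 1 then
        acc ++ [PySem.List.pyGetD (PySem.Str.split₀ word) (-1) ""]
      else acc ++ [word]) = fun acc word => acc ++ [pvUni word] := by
    funext acc word
    unfold pvUni
    split_ifs <;> rfl
  rw [h, PySem.List.foldl_append_singleton_eq_map]
  simp

lemma pvA_go (full : List String) : ∀ (d : List String) (k : Nat) (acc : List String),
    d = full.drop k →
    (PySem.List.enumerate d (k : Int)).foldl (fun res p =>
      if p.1 = (full.length : Int) - 1 then res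
      else res ++ [PySem.Str.join " " [PySem.List.pyGetD full p.1 "",
                                       PySem.List.pyGetD full (p.1 + 1) ""]]) acc
    = acc ++ pvPairs d := by
  intro d
  induction d with
  | nil => intro k acc _; simp [PySem.List.enumerate_nil, pvPairs]
  | cons x t ih =>
    intro k acc hd
    have hk : k < full.length := by
      by_contra h
      rw [List.drop_eq_nil_of_le (by omega)] at hd
      simp at hd
    have hx : full[k]? = some x := by
      have := congrArg (fun l => l[0]?) hd
      simpa using this.symm
    have ht : t = full.drop (k + 1) := by
      have := congrArg List.tail hd
      simpa [List.tail_drop] using this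
    rw [PySem.List.enumerate_cons, List.foldl_cons]
    by_cases hlast : k = full.length - 1
    · have htnil : t = [] := by
        rw [ht, List.drop_eq_nil_of_le (by omega)]
      have hcond : ((k : Int) = (full.length : Int) - 1) := by omega
      subst htnil
      simp [hcond, PySem.List.enumerate_nil, pvPairs]
    · have hk1 : k + 1 < full.length := by omega
      obtain ⟨y, t', hty⟩ : ∃ y t', t = y :: t' := by
        rcases t with _ | ⟨y, t'⟩
        · exfalso
          have := congrArg List.length ht
          simp [List.length_drop] at this
          omega
        · exact ⟨y, t', rfl⟩
      have hy : full[k + 1]? = some y := by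
        have := congrArg (fun l => l[0]?) ht
        rw [hty] at this
        simpa using this.symm
      have hcond : ¬ ((k : Int) = (full.length : Int) - 1) := by
        intro h; apply hlast; omega
      have hgx : PySem.List.pyGetD full (k : Int) "" = x := by
        rw [PySem.List.pyGetD_natCast]
        simp [List.getD_eq_getElem?_getD, hx]
      have hgy : PySem.List.pyGetD full ((k : Int) + 1) "" = y := by
        have h1 : (k : Int) + 1 = ((k + 1 : Nat) : Int) := by push_cast; ring
        rw [h1, PySem.List.pyGetD_natCast]
        simp [List.getD_eq_getElem?_getD, hy]
      rw [if_neg hcond, hgx, hgy, pvJoin_pair]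
      have : (k : Int) + 1 = ((k + 1 : Nat) : Int) := by push_cast; ring
      rw [this, ih (k + 1) (acc ++ [x ++ " " ++ y]) (hty ▸ ht)]
      rw [hty]
      simp [pvPairs]

lemma pvA_loop (us : List String) :
    (PySem.List.enumerate us 0).foldl (fun res p =>
      if p.1 = (us.length : Int) - 1 then res
      else res ++ [PySem.Str.join " " [PySem.List.pyGetD us p.1 "",
                                       PySem.List.pyGetD us (p.1 + 1) ""]]) [] = pvPairs us := by
  exact pvA_go us us 0 [] (by simp)


def pvPairsC : List (List Char) → List (List Char)
  | a :: b :: rest => (a ++ [' '] ++ b) :: pvPairsC (b :: rest)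
  | _ => []

lemma pvOfList_pair (a b : List Char) :
    String.ofList a ++ " " ++ String.ofList b = String.ofList (a ++ [' '] ++ b) := by
  apply String.ext
  simp

lemma pvPairs_map : ∀ (l : List (List Char)),
    pvPairs (l.map String.ofList) = (pvPairsC l).map String.ofList
  | [] => rfl
  | [a] => rfl
  | a :: b :: rest => by
    have ih := pvPairs_map (b :: rest)
    simp only [List.map, pvPairs, pvPairsC] at *
    rw [ih, pvOfList_pair]

lemma pvWs_eq (c : Char) (h : pvDomChar c = true) :
    PySem.Chars.isspace c = pvWS.contains c := by
  have hinj : ∀ a b : Char, a.toNat = b.toNat ↔ a = b := fun a b => eq_iff_eq_of_cmp_eq_cmp rfl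
  rw [Bool.eq_iff_iff]
  simp only [pvDomChar, Bool.or_eq_true, Bool.and_eq_true, decide_eq_true_eq, beq_iff_eq] at h
  simp only [PySem.Chars.isspace, pvWS, List.contains_eq_mem, List.mem_cons, List.not_mem_nil,
    or_false, decide_eq_true_eq, Bool.or_eq_true, Bool.and_eq_true, ← hinj]
  have h1 : (' ' : Char).toNat = 32 := rfl
  have h2 : ('\t' : Char).toNat = 9 := rfl
  have h3 : ('\n' : Char).toNat = 10 := rfl
  have h4 : ('\r' : Char).toNat = 13 := rfl
  have h5 : ('\x0b' : Char).toNat = 11 := rfl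
  have h6 : ('\x0c' : Char).toNat = 12 := rfl
  rw [h1, h2, h3, h4, h5, h6]
  omega

def pvStepScan (st : List Char × List Char) (ch : Char) : List Char × List Char :=
  if pvWS.contains ch then ((if st.2 ≠ [] then st.2 else st.1), []) else (st.1, st.2 ++ [ch])

def pvScan (st : List Char × List Char) (cs : List Char) : List Char × List Char :=
  cs.foldl pvStepScan st

def pvUniOf (st : List Char × List Char) : List Char := if st.2 ≠ [] then st.2 else st.1

def pvUniSeg (seg : List Char) : List Char := pvUniOf (pvScan ([], []) seg)

lemma pvGo_acc (cs : List Char) : ∀ (cur : List Char) (acc : List (List Char)),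
    PySem.Chars.split₀.go cs cur acc = acc.reverse ++ PySem.Chars.split₀.go cs cur [] := by
  induction cs with
  | nil =>
    intro cur acc
    simp only [PySem.Chars.split₀.go]
    split_ifs <;> simp
  | cons c rest ih =>
    intro cur acc
    simp only [PySem.Chars.split₀.go]
    split_ifs with hws hcur
    · exact ih [] acc
    · rw [ih [] (cur.reverse :: acc), ih [] [cur.reverse]]
      simp
    · exact ih (c :: cur) acc

lemma pvScan_go (cs : List Char) : ∀ (l c : List Char), (∀ ch ∈ cs, pvDomChar ch = true) →
    pvUniOf (pvScan (l, c) cs) = (PySem.Chars.split₀.go cs c.reverse []).getLastD l := by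
  induction cs with
  | nil =>
    intro l c _
    simp only [pvScan, List.foldl_nil, PySem.Chars.split₀.go]
    rcases c with _ | ⟨x, t⟩
    · simp [pvUniOf]
    · simp [pvUniOf]
  | cons ch t ih =>
    intro l c hdom
    have hd := hdom ch (List.mem_cons_self)
    have hws := pvWs_eq ch hd
    have hdt : ∀ x ∈ t, pvDomChar x = true := fun x hx => hdom x (List.mem_cons_of_mem _ hx)
    simp only [pvScan, List.foldl_cons]
    by_cases hsp : pvWS.contains ch
    · have hsp' : PySem.Chars.isspace ch = true := by rw [hws]; exact hsp
      have hmem : ch ∈ pvWS := by simpa [List.contains_eq_mem] using hsp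
      rcases c with _ | ⟨x, ct⟩
      · have := ih l [] hdt
        simp only [pvScan, List.reverse_nil] at this
        have hst : pvStepScan (l, []) ch = (l, []) := by
          simp [pvStepScan, hmem]
        rw [hst, this]
        simp only [PySem.Chars.split₀.go, hsp', if_pos, List.reverse_nil, List.isEmpty_nil]
      · have := ih (x :: ct) [] hdt
        simp only [pvScan, List.reverse_nil] at this
        have hst : pvStepScan (l, x :: ct) ch = (x :: ct, []) := by
          simp [pvStepScan, hmem]
        rw [hst, this]
        have hgo : PySem.Chars.split₀.go (ch :: t) (x :: ct).reverse [] =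
            (x :: ct) :: PySem.Chars.split₀.go t [] [] := by
          simp only [PySem.Chars.split₀.go, hsp', if_pos]
          have hne2 : ((x :: ct).reverse).isEmpty = false := by simp
          rw [hne2]
          simp only [Bool.false_eq_true, if_false, List.reverse_reverse]
          rw [pvGo_acc t [] [x :: ct]]
          simp
        rw [hgo, List.getLastD_cons]
    · have hsp' : PySem.Chars.isspace ch = false := by
        rw [hws]
        simpa [List.contains_eq_mem] using hsp
      have hmem : ch ∉ pvWS := by simpa [List.contains_eq_mem] using hsp
      have hst : pvStepScan (l, c) ch = (l, c ++ [ch]) := by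
        simp [pvStepScan, hmem]
      rw [hst]
      have := ih l (c ++ [ch]) hdt
      simp only [pvScan] at this
      rw [this, List.reverse_concat]
      simp only [PySem.Chars.split₀.go, hsp', Bool.false_eq_true, if_false]

lemma pvGo_allws (t : List Char) : ∀ (cur : List Char) (acc : List (List Char)),
    (∀ ch ∈ t, PySem.Chars.isspace ch = true) →
    PySem.Chars.split₀.go t cur acc = PySem.Chars.split₀.go [] cur acc := by
  induction t with
  | nil => intro _ _ _; rfl
  | cons c rest ih =>
    intro cur acc h
    have hc := h c (List.mem_cons_self)
    have hrest : ∀ ch ∈ rest, PySem.Chars.isspace ch = true :=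
      fun x hx => h x (List.mem_cons_of_mem _ hx)
    simp only [PySem.Chars.split₀.go, hc, if_pos]
    by_cases hcur : cur.isEmpty
    · rw [hcur]
      simp only [if_pos]
      rw [ih [] acc hrest]
      simp only [PySem.Chars.split₀.go, List.isEmpty_nil, if_pos]
    · have : cur.isEmpty = false := by simpa using hcur
      rw [this]
      simp only [Bool.false_eq_true, if_false]
      rw [ih [] (cur.reverse :: acc) hrest]
      simp [PySem.Chars.split₀.go]
  
lemma pvGo_ws_suffix (cs : List Char) : ∀ (t cur : List Char) (acc : List (List Char)),
    (∀ ch ∈ t, PySem.Chars.isspace ch = true) →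
    PySem.Chars.split₀.go (cs ++ t) cur acc = PySem.Chars.split₀.go cs cur acc := by
  induction cs with
  | nil =>
    intro t cur acc h
    simpa using pvGo_allws t cur acc h
  | cons c rest ih =>
    intro t cur acc h
    simp only [List.cons_append, PySem.Chars.split₀.go]
    split_ifs <;> rw [ih t _ _ h]

lemma pvGo_lstrip (cs : List Char) : ∀ (acc : List (List Char)),
    PySem.Chars.split₀.go (cs.dropWhile PySem.Chars.isspace) [] acc = PySem.Chars.split₀.go cs [] acc := by
  induction cs with
  | nil => intro acc; rfl
  | cons c rest ih =>
    intro acc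
    by_cases hc : PySem.Chars.isspace c
    · rw [List.dropWhile_cons_of_pos hc, ih acc]
      simp [PySem.Chars.split₀.go, hc]
    · rw [List.dropWhile_cons_of_neg hc]

lemma pvSplit₀_strip (cs : List Char) :
    PySem.Chars.split₀ (PySem.Chars.strip cs) = PySem.Chars.split₀ cs := by
  show PySem.Chars.split₀.go (PySem.Chars.rstrip (PySem.Chars.lstrip cs)) [] [] = _
  set m := PySem.Chars.lstrip cs with hm
  have hsplit : m = PySem.Chars.rstrip m ++ (m.reverse.takeWhile PySem.Chars.isspace).reverse := by
    unfold PySem.Chars.rstrip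
    conv_lhs => rw [← List.reverse_reverse m,
      ← List.takeWhile_append_dropWhile (p := PySem.Chars.isspace) (l := m.reverse)]
    rw [List.reverse_append]
  have hws : ∀ ch ∈ (m.reverse.takeWhile PySem.Chars.isspace).reverse, PySem.Chars.isspace ch = true := by
    intro ch hch
    rw [List.mem_reverse] at hch
    exact List.mem_takeWhile_imp hch
  calc PySem.Chars.split₀.go (PySem.Chars.rstrip m) [] []
      = PySem.Chars.split₀.go (PySem.Chars.rstrip m ++ (m.reverse.takeWhile PySem.Chars.isspace).reverse) [] [] :=
        (pvGo_ws_suffix _ _ _ _ hws).symm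
    _ = PySem.Chars.split₀.go m [] [] := by rw [← hsplit]
    _ = PySem.Chars.split₀.go cs [] [] := by rw [hm]; exact pvGo_lstrip cs []
  
lemma pvGo_ne_nil (cs : List Char) : ∀ (cur : List Char) (acc : List (List Char)),
    cur ≠ [] ∨ acc ≠ [] → PySem.Chars.split₀.go cs cur acc ≠ [] := by
  induction cs with
  | nil =>
    intro cur acc h
    simp only [PySem.Chars.split₀.go]
    rcases h with h | h
    · have : cur.isEmpty = false := by simpa using h
      rw [this]
      simp
    · split_ifs <;> simp [h]
  | cons c rest ih =>
    intro cur acc h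
    simp only [PySem.Chars.split₀.go]
    split_ifs with hws hcur
    · have : acc ≠ [] := by
        rcases h with h | h
        · exact absurd (by simpa using hcur) h
        · exact h
      exact ih [] acc (Or.inr this)
    · exact ih [] (cur.reverse :: acc) (Or.inr (by simp))
    · exact ih (c :: cur) acc (Or.inl (by simp))

lemma pvSplit₀_nil_allws (cs : List Char) (h : PySem.Chars.split₀ cs = []) :
    ∀ ch ∈ cs, PySem.Chars.isspace ch = true := by
  induction cs with
  | nil => intro ch hch; simp at hch
  | cons c rest ih =>
    intro ch hch
    by_cases hc : PySem.Chars.isspace c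
    · have h' : PySem.Chars.split₀ rest = [] := by
        show PySem.Chars.split₀.go rest [] [] = []
        have : PySem.Chars.split₀.go (c :: rest) [] [] = PySem.Chars.split₀.go rest [] [] := by
          simp [PySem.Chars.split₀.go, hc]
        rw [← this]; exact h
      rcases List.mem_cons.mp hch with rfl | hm
      · exact hc
      · exact ih h' ch hm
    · exfalso
      have : PySem.Chars.split₀.go (c :: rest) [] [] = PySem.Chars.split₀.go rest [c] [] := by
        simp [PySem.Chars.split₀.go, hc]
      exact pvGo_ne_nil rest [c] [] (Or.inl (by simp)) (by rw [← this]; exact h)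

lemma pvStrip_nil_of_allws (cs : List Char) (h : ∀ ch ∈ cs, PySem.Chars.isspace ch = true) :
    PySem.Chars.strip cs = [] := by
  have h1 : PySem.Chars.lstrip cs = [] := by
    unfold PySem.Chars.lstrip
    rw [List.dropWhile_eq_nil_iff]
    exact h
  show PySem.Chars.rstrip (PySem.Chars.lstrip cs) = []
  rw [h1]
  rfl

lemma pvGetD_neg_one {α : Type} (l : List α) (d : α) (h : l ≠ []) :
    PySem.List.pyGetD l (-1) d = l.getLastD d := by
  have hlen : 0 < l.length := List.length_pos_iff.mpr h
  have h1 : ¬ ((0:Int) ≤ -1) := by norm_num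
  have h2 : (-(l.length:Int) ≤ -1) := by omega
  simp only [PySem.List.pyGetD, PySem.List.pyGet?, PySem.List.pyIdx?, if_neg h1, if_pos h2]
  have h3 : (-(-1:Int)).toNat = 1 := rfl
  rw [h3]
  simp [List.getLastD_eq_getLast?, List.getLast?_eq_getElem?]

def pvSplitC (pre : List Char) : List Char → List (List Char)
  | [] => [pre]
  | c :: t => if c = ',' then pre :: pvSplitC [] t else pvSplitC (pre ++ [c]) t

lemma pvSplitOn_go_eq : ∀ (fuel : Nat) (l cur : List Char) (acc : List (List Char)),
    l.length < fuel →
    PySem.Chars.splitOn.go [','] fuel l cur acc = acc.reverse ++ pvSplitC cur.reverse l := by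
  intro fuel
  induction fuel with
  | zero => intro l cur acc h; omega
  | succ n ih =>
    intro l cur acc h
    rcases l with _ | ⟨c, rest⟩
    · simp [PySem.Chars.splitOn.go, pvSplitC]
    · by_cases hc : c = ','
      · subst hc
        have hpre : List.isPrefixOf [','] (',' :: rest) = true := by
          simp [List.isPrefixOf]
        simp only [PySem.Chars.splitOn.go, hpre, if_pos]
        have hdrop : List.drop (List.length [',']) (',' :: rest) = rest := by simp
        rw [hdrop, ih rest [] (cur.reverse :: acc) (by simpa using Nat.lt_of_succ_lt_succ h)]
        simp [pvSplitC]
      · have hpre : List.isPrefixOf [','] (c :: rest) = false := by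
          simp [List.isPrefixOf]
          exact fun hh => absurd hh.symm hc
        simp only [PySem.Chars.splitOn.go, hpre, Bool.false_eq_true, if_false]
        rw [ih rest (c :: cur) acc (by simpa using Nat.lt_of_succ_lt_succ h)]
        simp only [List.reverse_cons]
        have hsc : pvSplitC cur.reverse (c :: rest) = pvSplitC (cur.reverse ++ [c]) rest := by
          simp [pvSplitC, hc]
        rw [hsc]

lemma pvSplitOn_comma (cs : List Char) :
    PySem.Chars.splitOn cs [','] = pvSplitC [] cs := by
  show PySem.Chars.splitOn.go [','] (cs.length + 1) cs [] [] = _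
  rw [pvSplitOn_go_eq (cs.length + 1) cs [] [] (by omega)]
  rfl

lemma pvSplitC_mem : ∀ (cs pre seg : List Char), seg ∈ pvSplitC pre cs →
    ∀ ch ∈ seg, ch ∈ pre ∨ ch ∈ cs := by
  intro cs
  induction cs with
  | nil =>
    intro pre seg hseg ch hch
    simp only [pvSplitC, List.mem_singleton] at hseg
    subst hseg
    exact Or.inl hch
  | cons c t ih =>
    intro pre seg hseg ch hch
    by_cases hc : c = ','
    · subst hc
      simp only [pvSplitC, if_pos, List.mem_cons] at hseg
      rcases hseg with rfl | hseg
      · exact Or.inl hch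
      · rcases ih [] seg hseg ch hch with h | h
        · simp at h
        · exact Or.inr (List.mem_cons_of_mem _ h)
    · simp only [pvSplitC, hc, if_false] at hseg
      rcases ih (pre ++ [c]) seg hseg ch hch with h | h
      · rcases List.mem_append.mp h with h | h
        · exact Or.inl h
        · simp only [List.mem_singleton] at h
          subst h
          exact Or.inr (List.mem_cons_self)
      · exact Or.inr (List.mem_cons_of_mem _ h)

def pvUniA (seg : List Char) : List Char :=
  if (PySem.Chars.split₀ (PySem.Chars.strip seg)).length ≥ 1 then
    PySem.List.pyGetD (PySem.Chars.split₀ (PySem.Chars.strip seg)) (-1) []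
  else PySem.Chars.strip seg

lemma pvUniSeg_eq_uniA (seg : List Char) (h : ∀ ch ∈ seg, pvDomChar ch = true) :
    pvUniSeg seg = pvUniA seg := by
  have hscan : pvUniSeg seg = (PySem.Chars.split₀ seg).getLastD [] := by
    show pvUniOf (pvScan ([], []) seg) = _
    have := pvScan_go seg [] [] h
    simpa using this
  rw [hscan]
  unfold pvUniA
  rw [pvSplit₀_strip]
  by_cases hnil : PySem.Chars.split₀ seg = []
  · have h1 : ¬ ((PySem.Chars.split₀ seg).length ≥ 1) := by rw [hnil]; simp
    rw [if_neg h1, hnil, pvStrip_nil_of_allws seg (pvSplit₀_nil_allws seg hnil)]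
    rfl
  · rw [if_pos (by
      have := List.length_pos_iff.mpr hnil
      omega)]
    rw [pvGetD_neg_one _ _ hnil]

def pvU (st : List Char × List Char) : List Char → List (List Char)
  | [] => [pvUniOf st]
  | ch :: t => if ch = ',' then pvUniOf st :: pvU ([], []) t else pvU (pvStepScan st ch) t

def pvP : Option (List Char) → List (List Char) → List (List Char)
  | none, us => pvPairsC us
  | some p, us => pvPairsC (p :: us)

def pvStepB (st : List (List Char) × Option (List Char) × List Char × List Char) (ch : Char) :
    List (List Char) × Option (List Char) × List Char × List Char :=
  let res := st.1; let prev := st.2.1; let last := st.2.2.1; let cur := st.2.2.2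
  if ch = ',' then
    let uni := if cur ≠ [] then cur else last
    (match prev with
     | some p => res ++ [p ++ [' '] ++ uni]
     | none => res, some uni, ([] : List Char), ([] : List Char))
  else if pvWS.contains ch then
    (res, prev, (if cur ≠ [] then cur else last), ([] : List Char))
  else
    (res, prev, last, cur ++ [ch])

lemma pvP_step (prev : Option (List Char)) (u : List Char) (rest : List (List Char)) :
    pvP prev (u :: rest) = (match prev with
      | some p => [p ++ [' '] ++ u]
      | none => []) ++ pvP (some u) rest := by
  cases prev with
  | none => simp [pvP]
  | some p => simp [pvP, pvPairsC]

lemma pvB_main (cs : List Char) : ∀ (res : List (List Char)) (prev : Option (List Char))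
    (st : List Char × List Char),
    ((cs ++ [',']).foldl pvStepB (res, prev, st.1, st.2)).1 = res ++ pvP prev (pvU st cs) := by
  induction cs with
  | nil =>
    intro res prev st
    cases prev with
    | none => simp [pvStepB, pvP, pvU, pvPairsC, pvUniOf]
    | some p => simp [pvStepB, pvP, pvU, pvPairsC, pvUniOf]
  | cons ch t ih =>
    intro res prev st
    by_cases hc : ch = ','
    · subst hc
      cases prev with
      | none =>
        rw [List.cons_append, List.foldl_cons]
        have hstep : pvStepB (res, none, st.1, st.2) ',' = (res, some (pvUniOf st), [], []) := by
          simp [pvStepB, pvUniOf]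
        rw [hstep, ih res (some (pvUniOf st)) ([], [])]
        rw [pvU, if_pos rfl, pvP_step]
        simp
      | some p =>
        rw [List.cons_append, List.foldl_cons]
        have hstep : pvStepB (res, some p, st.1, st.2) ',' =
            (res ++ [p ++ [' '] ++ pvUniOf st], some (pvUniOf st), [], []) := by
          simp [pvStepB, pvUniOf]
        rw [hstep, ih (res ++ [p ++ [' '] ++ pvUniOf st]) (some (pvUniOf st)) ([], [])]
        rw [pvU, if_pos rfl, pvP_step]
        simp
    · have hstep : pvStepB (res, prev, st.1, st.2) ch =
          (res, prev, (pvStepScan st ch).1, (pvStepScan st ch).2) := by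
        by_cases hw : pvWS.contains ch
        · have hmem : ch ∈ pvWS := by simpa [List.contains_eq_mem] using hw
          simp [pvStepB, pvStepScan, hc, hmem]
        · have hmem : ch ∉ pvWS := by simpa [List.contains_eq_mem] using hw
          simp [pvStepB, pvStepScan, hc, hmem]
      rw [List.cons_append, List.foldl_cons, hstep, ih res prev (pvStepScan st ch)]
      rw [pvU, if_neg hc]

lemma pvU_eq_map (cs : List Char) : ∀ (pre : List Char),
    pvU (pvScan ([], []) pre) cs = (pvSplitC pre cs).map pvUniSeg := by
  induction cs with
  | nil =>
    intro pre
    simp [pvU, pvSplitC, pvUniSeg]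
  | cons ch t ih =>
    intro pre
    by_cases hc : ch = ','
    · subst hc
      rw [pvU, if_pos rfl]
      have ih0 : pvU ([], []) t = (pvSplitC [] t).map pvUniSeg := by
        simpa [pvScan] using ih []
      rw [ih0]
      simp [pvSplitC, pvUniSeg]
    · rw [pvU, if_neg hc]
      have hsc : pvStepScan (pvScan ([], []) pre) ch = pvScan ([], []) (pre ++ [ch]) := by
        simp [pvScan, List.foldl_append]
      rw [hsc, ih (pre ++ [ch])]
      simp [pvSplitC, hc]


theorem pvAssembly (doc : String) (hdomL : ∀ ch ∈ doc.toList, pvDomChar ch = true)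
    (tokensA : List String)
    (hA : tokensA = ((PySem.Str.split? doc ",").getD []).map PySem.Str.strip) :
    pvPairs (tokensA.map (fun word => if (PySem.Str.split₀ word).length ≥ 1 then
        PySem.List.pyGetD (PySem.Str.split₀ word) (-1) "" else word))
    = (((doc.toList ++ [',']).foldl pvStepB ([], none, [], [])).1).map String.ofList := by
  -- split? at char level
  have hsplit : PySem.Str.split? doc "," = some ((pvSplitC [] doc.toList).map String.ofList) := by
    have h1 := PySem.Str.split?_map doc ","
    have h2 : PySem.Chars.split? doc.toList (",").toList = some (pvSplitC [] doc.toList) := by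
      have he : (",").toList = [','] := rfl
      rw [he]
      simp [PySem.Chars.split?, pvSplitOn_comma]
    rw [h2] at h1
    rcases hsp : PySem.Str.split? doc "," with _ | xs
    · rw [hsp] at h1; simp at h1
    · rw [hsp] at h1
      simp only [Option.map_some, Option.some.injEq] at h1
      congr 1
      rw [← h1, List.map_map]
      simp [Function.comp_def]
  have hstrip : ∀ seg : List Char, PySem.Str.strip (String.ofList seg) = String.ofList (PySem.Chars.strip seg) := by
    intro seg
    apply String.ext
    simp [PySem.Str.toList_strip]
  have hUniEq : ∀ seg : List Char, (if (PySem.Str.split₀ (String.ofList (PySem.Chars.strip seg))).length ≥ 1 then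
        PySem.List.pyGetD (PySem.Str.split₀ (String.ofList (PySem.Chars.strip seg))) (-1) ""
        else String.ofList (PySem.Chars.strip seg))
      = String.ofList (pvUniA seg) := by
    intro seg
    have hsz : PySem.Str.split₀ (String.ofList (PySem.Chars.strip seg)) =
        (PySem.Chars.split₀ (PySem.Chars.strip seg)).map String.ofList := by
      have h1 := PySem.Str.split₀_map_toList (String.ofList (PySem.Chars.strip seg))
      have h2 : (String.ofList (PySem.Chars.strip seg)).toList = PySem.Chars.strip seg := by simp
      rw [h2] at h1
      rw [← h1, List.map_map]
      simp [Function.comp_def]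
    simp only [hsz, List.length_map]
    unfold pvUniA
    split_ifs with hlen
    · have he : ("" : String) = String.ofList [] := rfl
      rw [he, PySem.List.pyGetD_map]
    · rfl
  have hsegdom : ∀ seg ∈ pvSplitC [] doc.toList, ∀ ch ∈ seg, pvDomChar ch = true := by
    intro seg hseg ch hch
    rcases pvSplitC_mem doc.toList [] seg hseg ch hch with h | h
    · simp at h
    · exact hdomL ch h
  rw [hA, hsplit]
  simp only [Option.getD_some, List.map_map]
  have hmapeq : (pvSplitC [] doc.toList).map ((fun word => if (PySem.Str.split₀ word).length ≥ 1 then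
        PySem.List.pyGetD (PySem.Str.split₀ word) (-1) "" else word) ∘ PySem.Str.strip ∘ String.ofList)
      = ((pvSplitC [] doc.toList).map pvUniSeg).map String.ofList := by
    rw [List.map_map]
    apply List.map_congr_left
    intro seg hseg
    simp only [Function.comp_def]
    rw [hstrip seg, hUniEq seg, pvUniSeg_eq_uniA seg (hsegdom seg hseg)]
  rw [hmapeq, pvPairs_map]
  have hB := pvB_main doc.toList [] none ([], [])
  simp only at hB
  rw [hB]
  have hU : pvU ([], []) doc.toList = (pvSplitC [] doc.toList).map pvUniSeg := by
    simpa [pvScan] using pvU_eq_map doc.toList []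
  rw [hU]
  rfl

theorem pv_main (doc : String) (hdom : Dom_tokenizer_all doc) :
    tokenizer_all doc = tokenizer_all_alt doc := by
  have hdomL : ∀ ch ∈ doc.toList, pvDomChar ch = true := by
    have h : pvDomStr doc = true := hdom
    simpa [pvDomStr, List.all_eq_true] using h
  have hA : tokenizer_all doc =
      pvPairs ((((PySem.Str.split? doc ",").getD []).map PySem.Str.strip).map pvUni) := by
    unfold tokenizer_all
    simp only [pvA_unigrams]
    exact pvA_loop _
  have hfun : pvUni = (fun word => if (PySem.Str.split₀ word).length ≥ 1 then
      PySem.List.pyGetD (PySem.Str.split₀ word) (-1) "" else word) := by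
    funext w
    unfold pvUni
    rfl
  have halt : tokenizer_all_alt doc =
      (((doc.toList ++ [',']).foldl pvStepB ([], none, [], [])).1).map String.ofList := rfl
  rw [hA, hfun, pvAssembly doc hdomL _ rfl, halt]

-- ===== VERDICT (by name: the statement is the Claim_ definition above) =====
theorem tokenizer_all_spec : Claim_equal_tokenizer_all := by
  intro doc h
  exact pv_main doc h
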